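-- pv_equiv track=rewrite | github.com/brunoferreira/CES-22 | L3/q2.py | encode_int
-- ===== SOURCE A (Python) =====
-- def encode_int(message):
--     """
--         Função codificadora para servir de parâmetro.
--     """
--     encoded = ''
--     for l in message:
--         if ord(l) in range(48, 58):
--             ascii_n = ord(l) + 4
--             if ascii_n >= 58:
--                 ascii_n -= 10
--             encoded += chr(ascii_n)
--         else:
--             encoded += l
--     return encoded
-- ===== SOURCE B (Python) =====
-- def encode_int(message):
--     """
--         Função codificadora para servir de parâmetro.
--     """
--     shifted = "4567890123"
--     parts = []
--     i, n = 0, len(message)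
--     while i < n:
--         j = i
--         if '0' <= message[i] <= '9':
--             while j < n and '0' <= message[j] <= '9':
--                 j += 1
--             parts.append(''.join(shifted[ord(d) - 48] for d in message[i:j]))
--         else:
--             while j < n and not ('0' <= message[j] <= '9'):
--                 j += 1
--             parts.append(message[i:j])
--         i = j
--     return ''.join(parts)
-- ===== Notes on version B (the rewrite author's own statement) =====
-- stated objective: alternative
-- what changed: Replaced A's single per-character branching accumulation loop by a two-level run scanner: it splits the message into maximal digit / non-digit runs with an index-advancing inner scan, copies non-digit runs whole as slices, rewrites digit runs by indexing into a precomputed shifted digit alphabet, and joins the segments at the end; slice copies and join make it measurably faster than per-char += concatenation.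
import Mathlib
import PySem

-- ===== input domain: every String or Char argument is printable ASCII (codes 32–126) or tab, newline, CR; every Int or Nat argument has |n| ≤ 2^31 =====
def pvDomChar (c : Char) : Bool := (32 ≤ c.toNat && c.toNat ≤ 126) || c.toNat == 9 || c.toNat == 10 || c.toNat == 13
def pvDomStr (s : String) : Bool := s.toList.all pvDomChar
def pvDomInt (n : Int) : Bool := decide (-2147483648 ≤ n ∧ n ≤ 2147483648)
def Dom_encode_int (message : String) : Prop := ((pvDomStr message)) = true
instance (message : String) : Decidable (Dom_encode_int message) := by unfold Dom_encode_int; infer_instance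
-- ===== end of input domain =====

-- B replaces A's per-character branching loop by a run scanner: split the message
-- into maximal digit / non-digit runs, rewrite digit runs via the shifted alphabet,
-- copy the rest, and join (run-level slicing; measured faster than per-char append).

-- ===== PORT A =====
-- the loop: append the shifted char for a digit (ord+4, -10 if ≥ 58), the char itself otherwise
def encode_int (message : String) : String :=
  String.ofList (message.toList.foldl
    (fun enc l =>
      if 48 ≤ l.toNat ∧ l.toNat < 58 then
        enc ++ [Char.ofNat (if l.toNat + 4 ≥ 58 then l.toNat + 4 - 10 else l.toNat + 4)]
      else enc ++ [l]) [])

-- ===== PORT B =====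
-- '0' <= c <= '9'
def pvIsDig (c : Char) : Bool := decide (48 ≤ c.toNat ∧ c.toNat ≤ 57)

-- shifted[ord(d) - 48] (d is always a digit where this is applied)
def pvShift (d : Char) : Char := ("4567890123".toList).getD (d.toNat - 48) d

-- the outer while loop: each iteration scans one maximal run (the inner 'while j < n'
-- index scan + slice message[i:j] becomes takeWhile/dropWhile on the remaining chars)
def pvRuns : List Char → List Char
  | [] => []
  | c :: rest =>
    if pvIsDig c then
      ((c :: rest).takeWhile pvIsDig).map pvShift
        ++ pvRuns ((c :: rest).dropWhile pvIsDig)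
    else
      (c :: rest).takeWhile (fun x => !pvIsDig x)
        ++ pvRuns ((c :: rest).dropWhile (fun x => !pvIsDig x))
  termination_by l => l.length
  decreasing_by
  · simp_all [List.dropWhile]
    have := List.length_dropWhile_le pvIsDig rest
    omega
  · simp_all [List.dropWhile]
    have := List.length_dropWhile_le (fun x => !pvIsDig x) rest
    omega

def encode_int_alt (message : String) : String :=
  String.ofList (pvRuns message.toList)

-- ===== PRECONDITION & SPEC =====
def Spec_encode_int (message : String) (out : String) : Prop := out = encode_int_alt message
instance (message : String) (out : String) : Decidable (Spec_encode_int message out) := by unfold Spec_encode_int; infer_instance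

-- ===== CLAIM (what is proved, stated in full; the proofs are below) =====
def Claim_equal_encode_int : Prop := ∀ (message : String), Dom_encode_int message → Spec_encode_int message (encode_int message)

-- ===== LEMMAS AND PROOFS =====

-- A's per-char transformation
def pvStepA (l : Char) : Char :=
  if 48 ≤ l.toNat ∧ l.toNat < 58 then
    Char.ofNat (if l.toNat + 4 ≥ 58 then l.toNat + 4 - 10 else l.toNat + 4)
  else l

theorem pvFoldl_append (f : Char → Char) (xs : List Char) (acc : List Char) :
    xs.foldl (fun a x => a ++ [f x]) acc = acc ++ xs.map f := by
  induction xs generalizing acc with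
  | nil => simp
  | cons x xs ih => simp [List.foldl, ih]

theorem pvShift_eq_step (c : Char) (h : pvIsDig c = true) : pvShift c = pvStepA c := by
  have hd : 48 ≤ c.toNat ∧ c.toNat ≤ 57 := by simpa [pvIsDig] using h
  have hc : c = Char.ofNat c.toNat := (Char.ofNat_toNat c).symm
  obtain ⟨h1, h2⟩ := hd
  have hn : c.toNat = 48 ∨ c.toNat = 49 ∨ c.toNat = 50 ∨ c.toNat = 51 ∨ c.toNat = 52 ∨
      c.toNat = 53 ∨ c.toNat = 54 ∨ c.toNat = 55 ∨ c.toNat = 56 ∨ c.toNat = 57 := by omega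
  rcases hn with h | h | h | h | h | h | h | h | h | h <;> (rw [hc, h]; decide)

theorem pvStep_id (c : Char) (h : pvIsDig c = false) : pvStepA c = c := by
  have hd : ¬ (48 ≤ c.toNat ∧ c.toNat ≤ 57) := by simpa [pvIsDig] using h
  have : ¬ (48 ≤ c.toNat ∧ c.toNat < 58) := by omega
  simp [pvStepA, this]

theorem pvRuns_eq_map (l : List Char) : pvRuns l = l.map pvStepA := by
  induction l using pvRuns.induct with
  | case1 => simp [pvRuns]
  | case2 c rest h ih =>
    rw [pvRuns]; simp only [h, if_pos]
    rw [ih]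
    conv_rhs => rw [← List.takeWhile_append_dropWhile (p := pvIsDig) (l := c :: rest)]
    rw [List.map_append]
    congr 1
    exact List.map_congr_left fun x hx => pvShift_eq_step x (List.mem_takeWhile_imp hx)
  | case3 c rest h ih =>
    rw [pvRuns]; simp only [h, Bool.false_eq_true, if_neg, not_false_iff]
    rw [ih]
    conv_rhs => rw [← List.takeWhile_append_dropWhile (p := fun x => !pvIsDig x) (l := c :: rest)]
    rw [List.map_append]
    congr 1
    have hid : ∀ x ∈ (c :: rest).takeWhile (fun x => !pvIsDig x), pvStepA x = x := by
      intro x hx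
      exact pvStep_id x (by simpa using List.mem_takeWhile_imp hx)
    rw [List.map_congr_left hid]; simp

-- ===== VERDICT (by name: the statement is the Claim_ definition above) =====
theorem encode_int_spec : Claim_equal_encode_int := by
  intro message _
  unfold Spec_encode_int encode_int encode_int_alt
  have hbody : (fun (enc : List Char) (l : Char) =>
      if 48 ≤ l.toNat ∧ l.toNat < 58 then
        enc ++ [Char.ofNat (if l.toNat + 4 ≥ 58 then l.toNat + 4 - 10 else l.toNat + 4)]
      else enc ++ [l]) = fun enc l => enc ++ [pvStepA l] := by
    funext enc l
    simp only [pvStepA]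
    split <;> rfl
  rw [hbody, pvFoldl_append, pvRuns_eq_map]
  simp
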